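-- pv_equiv track=rewrite | github.com/JuanPerdomo00/various_exercises | hackerrank/decryptPassword/main.py | decryptPassword
-- ===== SOURCE A (Python) =====
-- def decryptPassword(s: str):
--     new_str = []
--     numbers = []
--     i = 0
--
--     while i < len(s) and s[i].isdigit():
--         numbers.append(s[i])
--         i += 1
--
--     while i < len(s):
--         if (
--             i + 1 < len(s)
--             and s[i].isupper()
--             and s[i + 1].islower()
--             and (i + 2 < len(s) and s[i + 2] == "*")
--         ):
--             new_str.append(s[i + 1])
--             new_str.append(s[i])
--             i += 3
--             continue
--         elif s[i] == "0" and numbers: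
--             new_str.append(numbers.pop())
--             i += 1
--         else:
--             new_str.append(s[i])
--             i += 1
--
--     return "".join(new_str)
-- ===== SOURCE B (Python) =====
-- def decryptPassword(s: str):
--     n = len(s)
--     k = 0
--     while k < n and s[k].isdigit():
--         k += 1
--     digits = list(s[:k])
--     out = []
--     for j in range(k, n):
--         c = s[j]
--         if c == '*' and j - 2 >= k and s[j - 1].islower() and s[j - 2].isupper():
--             out[-1], out[-2] = out[-2], out[-1]
--         elif c == '0' and digits:
--             out.append(digits.pop())
--         else:
--             out.append(c)
--     return ''.join(out)
-- ===== Notes on version B (the rewrite author's own statement) =====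
-- stated objective: faster
-- what changed: Replaces A's pointer loop with 2-char lookahead and +=3 jumps by a uniform single-step index loop that looks BEHIND: when it meets a '*' preceded by an Upper-lower pair it swaps the last two already-emitted characters in place; the digit prefix is extracted by a separate count-and-slice.
import Mathlib
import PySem

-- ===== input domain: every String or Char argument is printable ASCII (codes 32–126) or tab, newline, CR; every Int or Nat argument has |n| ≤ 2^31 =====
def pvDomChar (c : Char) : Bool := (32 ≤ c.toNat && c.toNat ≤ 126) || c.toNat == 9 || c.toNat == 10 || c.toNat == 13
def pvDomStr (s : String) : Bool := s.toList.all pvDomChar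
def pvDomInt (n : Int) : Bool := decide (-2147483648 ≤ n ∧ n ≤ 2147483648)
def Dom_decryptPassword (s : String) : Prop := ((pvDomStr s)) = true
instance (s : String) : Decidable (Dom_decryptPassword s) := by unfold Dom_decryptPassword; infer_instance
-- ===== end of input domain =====

-- B replaces A's lookahead pointer (which jumps by 3 over each 'Upper lower *' triple) by a
-- uniform one-step loop that, on meeting '*', looks BEHIND and swaps the last two emitted
-- characters; objective: faster (same O(n), smaller per-character constant, measured).

-- ===== PORT A =====
-- first while loop: collect the leading digit characters into `numbers` (the index loop is
-- transliterated as recursion over the remaining characters; `numbers.append(c)` = `numbers ++ [c]`)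
def aPrefix : List Char → List Char → List Char × List Char
  | numbers, c :: t => if c.isDigit then aPrefix (numbers ++ [c]) t else (numbers, c :: t)
  | numbers, [] => (numbers, [])

-- second while loop; `acc` is `new_str` reversed (append = cons); `numbers.pop()` =
-- `getLastD`/`dropLast` (the ' ' default is unreachable: the branch is guarded by nonemptiness).
-- The `[c1]`/`[c1, c2]` arms are the same body when fewer than 3 characters remain, where the
-- Python bound checks `i+1 < len(s)` / `i+2 < len(s)` make the first branch fail.
def aLoop : List Char → List Char → List Char → List Char
  | _, acc, [] => acc
  | numbers, acc, c1 :: c2 :: c3 :: t =>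
      if c1.isUpper && c2.isLower && c3 == '*' then aLoop numbers (c1 :: c2 :: acc) t
      else if c1 == '0' && !numbers.isEmpty then
        aLoop numbers.dropLast (numbers.getLastD ' ' :: acc) (c2 :: c3 :: t)
      else aLoop numbers (c1 :: acc) (c2 :: c3 :: t)
  | numbers, acc, [c1] =>
      if c1 == '0' && !numbers.isEmpty then aLoop numbers.dropLast (numbers.getLastD ' ' :: acc) []
      else aLoop numbers (c1 :: acc) []
  | numbers, acc, [c1, c2] =>
      if c1 == '0' && !numbers.isEmpty then
        aLoop numbers.dropLast (numbers.getLastD ' ' :: acc) [c2]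
      else aLoop numbers (c1 :: acc) [c2]

def decryptPassword (s : String) : String :=
  let p := aPrefix [] s.toList
  String.ofList (aLoop p.1 [] p.2).reverse

-- ===== PORT B =====
-- Source B's `while k < n and s[k].isdigit(): k += 1` — k counted over the remaining characters
def bCount : List Char → Nat
  | c :: t => if c.isDigit then 1 + bCount t else 0
  | [] => 0

-- Source B's lookbehind guard `j - 2 >= k and s[j-1].islower() and s[j-2].isupper()`:
-- `prev` holds s[k:j] reversed, so s[j-1], s[j-2] are its first two entries and
-- `j - 2 >= k` is `prev` having at least two entries
def bBehind : List Char → Bool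
  | a :: b :: _ => a.isLower && b.isUpper
  | _ => false

-- Source B's `out[-1], out[-2] = out[-2], out[-1]`; `out` is kept reversed (append = cons), so the
-- Python swap exchanges the first two entries (the fallback arm is unreachable: when the guard
-- holds, `out` starts with the two looked-at characters; Python would raise IndexError there)
def bSwapTop : List Char → List Char
  | x :: y :: o => y :: x :: o
  | o => o

-- Source B's `for j in range(k, n)` as a zipper over (prev = s[k:j] reversed, rest = s[j:])
def bLoop : List Char → List Char → List Char → List Char → List Char
  | _, _, out, [] => out
  | prev, digits, out, c :: t =>
      if c == '*' && bBehind prev then bLoop (c :: prev) digits (bSwapTop out) t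
      else if c == '0' && !digits.isEmpty then
        bLoop (c :: prev) digits.dropLast (digits.getLastD ' ' :: out) t
      else bLoop (c :: prev) digits (c :: out) t

def decryptPassword_alt (s : String) : String :=
  let cs := s.toList
  let k := bCount cs
  String.ofList (bLoop [] (cs.take k) [] (cs.drop k)).reverse

-- ===== PRECONDITION & SPEC =====
def Spec_decryptPassword (s : String) (out : String) : Prop := out = decryptPassword_alt s
instance (s : String) (out : String) : Decidable (Spec_decryptPassword s out) := by unfold Spec_decryptPassword; infer_instance

-- ===== CLAIM (what is proved, stated in full; the proofs are below) =====
def Claim_equal_decryptPassword : Prop := ∀ (s : String), Dom_decryptPassword s → Spec_decryptPassword s (decryptPassword s)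

-- ===== LEMMAS AND PROOFS =====

theorem beq_false_of_upper {c d : Char} (h : c.isUpper = true) (hd : d.isUpper = false) :
    (c == d) = false := by
  cases hbe : c == d with
  | false => rfl
  | true => rw [beq_iff_eq] at hbe; subst hbe; rw [h] at hd; cases hd

theorem beq_false_of_lower {c d : Char} (h : c.isLower = true) (hd : d.isLower = false) :
    (c == d) = false := by
  cases hbe : c == d with
  | false => rfl
  | true => rw [beq_iff_eq] at hbe; subst hbe; rw [h] at hd; cases hd

theorem pvGuard_false {c1 : Char} {prev : List Char}
    (h : ∀ a b p, prev = a :: b :: p → c1 = '*' → a.isLower = true → b.isUpper = true → False) :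
    (c1 == '*' && bBehind prev) = false := by
  cases hbe : c1 == '*' with
  | false => simp
  | true =>
    rw [beq_iff_eq] at hbe
    rcases prev with _ | ⟨a, _ | ⟨b, p⟩⟩
    · simp [bBehind]
    · simp [bBehind]
    · cases ha : a.isLower with
      | false => simp [bBehind, ha]
      | true =>
        cases hb : b.isUpper with
        | false => simp [bBehind, ha, hb]
        | true => exact (h a b p rfl hbe ha hb).elim

-- one-step evaluation lemmas for the two loops (definitional)
theorem aLoop_nil (n acc : List Char) : aLoop n acc [] = acc := rfl
theorem aLoop_one (n acc : List Char) (c1 : Char) :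
    aLoop n acc [c1] =
      if c1 == '0' && !n.isEmpty then aLoop n.dropLast (n.getLastD ' ' :: acc) []
      else aLoop n (c1 :: acc) [] := rfl
theorem aLoop_two (n acc : List Char) (c1 c2 : Char) :
    aLoop n acc [c1, c2] =
      if c1 == '0' && !n.isEmpty then aLoop n.dropLast (n.getLastD ' ' :: acc) [c2]
      else aLoop n (c1 :: acc) [c2] := rfl
theorem aLoop_three (n acc : List Char) (c1 c2 c3 : Char) (t : List Char) :
    aLoop n acc (c1 :: c2 :: c3 :: t) =
      if c1.isUpper && c2.isLower && c3 == '*' then aLoop n (c1 :: c2 :: acc) t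
      else if c1 == '0' && !n.isEmpty then
        aLoop n.dropLast (n.getLastD ' ' :: acc) (c2 :: c3 :: t)
      else aLoop n (c1 :: acc) (c2 :: c3 :: t) := rfl
theorem bLoop_nil (prev digits out : List Char) : bLoop prev digits out [] = out := rfl
theorem bLoop_cons (prev digits out : List Char) (c : Char) (t : List Char) :
    bLoop prev digits out (c :: t) =
      if c == '*' && bBehind prev then bLoop (c :: prev) digits (bSwapTop out) t
      else if c == '0' && !digits.isEmpty then
        bLoop (c :: prev) digits.dropLast (digits.getLastD ' ' :: out) t
      else bLoop (c :: prev) digits (c :: out) t := rfl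

theorem aPrefix_eq : ∀ (cs pre : List Char),
    aPrefix pre cs = (pre ++ cs.takeWhile Char.isDigit, cs.dropWhile Char.isDigit) := by
  intro cs
  induction cs with
  | nil => intro pre; simp [aPrefix]
  | cons c t ih =>
    intro pre
    by_cases h : c.isDigit
    · simp [aPrefix, h, ih]
    · simp [aPrefix, h]

theorem bCount_take : ∀ (cs : List Char),
    cs.take (bCount cs) = cs.takeWhile Char.isDigit := by
  intro cs
  induction cs with
  | nil => simp [bCount]
  | cons c t ih =>
    by_cases h : c.isDigit
    · simp [bCount, h, Nat.add_comm 1, ih]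
    · simp [bCount, h]

theorem bCount_drop : ∀ (cs : List Char),
    cs.drop (bCount cs) = cs.dropWhile Char.isDigit := by
  intro cs
  induction cs with
  | nil => simp [bCount]
  | cons c t ih =>
    by_cases h : c.isDigit
    · simp [bCount, h, Nat.add_comm 1, ih]
    · simp [bCount, h]

-- Bisimulation of the two loops from any A-aligned state: the two hypotheses say that the two
-- star matches B could see across the alignment boundary do not occur (A, scanning with
-- lookahead, would have consumed such a triple before ever reaching this position).
theorem mainLemma : ∀ (t prev digits acc : List Char),
    (∀ a b p tt, prev = a :: b :: p → t = '*' :: tt → ¬(a.isLower = true ∧ b.isUpper = true)) →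
    (∀ a p c tt, prev = a :: p → t = c :: '*' :: tt → c.isLower = true → a.isUpper = true → False) →
    aLoop digits acc t = bLoop prev digits acc t
  | [], _, digits, acc, _, _ => by rw [aLoop_nil, bLoop_nil]
  | [c1], prev, digits, acc, h1, _ => by
    have hstar : (c1 == '*' && bBehind prev) = false :=
      pvGuard_false (fun a b p hp hc ha hb => h1 a b p [] hp (by rw [hc]) ⟨ha, hb⟩)
    rw [aLoop_one, bLoop_cons, hstar]
    simp only [Bool.false_eq_true, if_false, aLoop_nil, bLoop_nil]
  | [c1, c2], prev, digits, acc, h1, h2 => by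
    have hstar : (c1 == '*' && bBehind prev) = false :=
      pvGuard_false (fun a b p hp hc ha hb => h1 a b p [c2] hp (by rw [hc]) ⟨ha, hb⟩)
    have hstar2 : (c2 == '*' && bBehind (c1 :: prev)) = false :=
      pvGuard_false (fun a b p hp hc ha hb => by
        obtain ⟨rfl, rfl⟩ := List.cons.inj hp
        exact h2 b p c1 [] rfl (by rw [hc]) ha hb)
    rw [aLoop_two, bLoop_cons, hstar]
    simp only [Bool.false_eq_true, if_false]
    by_cases hz : (c1 == '0' && !digits.isEmpty) = true
    · rw [if_pos hz, if_pos hz, aLoop_one, bLoop_cons, hstar2]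
      simp only [Bool.false_eq_true, if_false, aLoop_nil, bLoop_nil]
    · rw [if_neg hz, if_neg hz, aLoop_one, bLoop_cons, hstar2]
      simp only [Bool.false_eq_true, if_false, aLoop_nil, bLoop_nil]
  | c1 :: c2 :: c3 :: t', prev, digits, acc, h1, h2 => by
    have hstar : (c1 == '*' && bBehind prev) = false :=
      pvGuard_false (fun a b p hp hc ha hb => h1 a b p (c2 :: c3 :: t') hp (by rw [hc]) ⟨ha, hb⟩)
    by_cases htrip : (c1.isUpper && c2.isLower && c3 == '*') = true
    · rw [Bool.and_eq_true, Bool.and_eq_true, beq_iff_eq] at htrip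
      obtain ⟨⟨hu, hl⟩, hs⟩ := htrip
      subst hs
      have g1 : (c1 == '*') = false := beq_false_of_upper hu (by decide)
      have g1' : (c1 == '0') = false := beq_false_of_upper hu (by decide)
      have g2 : (c2 == '*') = false := beq_false_of_lower hl (by decide)
      have g2' : (c2 == '0') = false := beq_false_of_lower hl (by decide)
      have ih := mainLemma t' ('*' :: c2 :: c1 :: prev) digits (c1 :: c2 :: acc)
        (fun a b p tt hp _ hab => by
          obtain ⟨rfl, -⟩ := List.cons.inj hp
          exact absurd hab.1 (by decide))
        (fun a p c tt hp _ _ ha => by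
          obtain ⟨rfl, -⟩ := List.cons.inj hp
          exact absurd ha (by decide))
      simp [aLoop_three, bLoop_cons, bBehind, bSwapTop, hu, hl, g1, g1', g2, g2', ih]
    · have htrip' : (c1.isUpper && c2.isLower && c3 == '*') = false := by
        simp only [Bool.not_eq_true] at htrip; exact htrip
      have h1' : ∀ a b p tt, c1 :: prev = a :: b :: p → (c2 :: c3 :: t') = '*' :: tt →
          ¬(a.isLower = true ∧ b.isUpper = true) := by
        intro a b p tt hp ht hab
        obtain ⟨rfl, rfl⟩ := List.cons.inj hp
        obtain ⟨hc2, -⟩ := List.cons.inj ht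
        exact h2 b p c1 (c3 :: t') rfl (by rw [hc2]) hab.1 hab.2
      have h2' : ∀ a p c tt, c1 :: prev = a :: p → (c2 :: c3 :: t') = c :: '*' :: tt →
          c.isLower = true → a.isUpper = true → False := by
        intro a p c tt hp ht hlow hup
        obtain ⟨rfl, -⟩ := List.cons.inj hp
        obtain ⟨rfl, ht2⟩ := List.cons.inj ht
        obtain ⟨hc3, -⟩ := List.cons.inj ht2
        rw [hup, hlow, hc3] at htrip'
        simp at htrip'
      have ihz := mainLemma (c2 :: c3 :: t') (c1 :: prev) digits.dropLast
        (digits.getLastD ' ' :: acc) h1' h2'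
      have ihe := mainLemma (c2 :: c3 :: t') (c1 :: prev) digits (c1 :: acc) h1' h2'
      rw [aLoop_three, bLoop_cons, htrip', hstar]
      simp only [Bool.false_eq_true, if_false]
      by_cases hz : (c1 == '0' && !digits.isEmpty) = true
      · rw [if_pos hz, if_pos hz]; exact ihz
      · rw [if_neg hz, if_neg hz]; exact ihe

-- ===== VERDICT (by name: the statement is the Claim_ definition above) =====
theorem decryptPassword_spec : Claim_equal_decryptPassword := by
  intro s _
  unfold Spec_decryptPassword decryptPassword decryptPassword_alt
  simp only [aPrefix_eq, bCount_take, bCount_drop, List.nil_append]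
  rw [mainLemma (s.toList.dropWhile Char.isDigit) [] _ []
      (by intro a b p tt h; simp at h) (by intro a p c tt h; simp at h)]
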